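-- pv_equiv track=rewrite | github.com/cchristodoulaki/Pytheas | src/pytheas/pat_utilities.py | generate_symbol_summary
-- ===== SOURCE A (Python) =====
-- def generate_symbol_summary(attribute_symbols):
--     #initialize symbol list
--     attribute_symbols = [s for s in attribute_symbols if len(s)>0]
--     if len(attribute_symbols)>0:
--         summary_symbols = list(attribute_symbols[0])
--         for symbol in list(attribute_symbols[0]):
--             for symbolset in attribute_symbols:
--                 symbol_list = list(symbolset)
--                 if symbol not in symbolset:
--                     summary_symbols.remove(symbol)
--                     break
--     else:
--         summary_symbols = []
--     return summary_symbols
-- ===== SOURCE B (Python) =====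
-- def generate_symbol_summary(attribute_symbols):
--     sets = [s for s in attribute_symbols if s]
--     if not sets:
--         return []
--     counts = {}
--     for s in sets:
--         for c in set(s):
--             counts[c] = counts.get(c, 0) + 1
--     n = len(sets)
--     return [c for c in sets[0] if counts[c] == n]
-- ===== Notes on version B (the rewrite author's own statement) =====
-- stated objective: alternative
-- what changed: Replaces A's remove-with-rescan loop (for each char of the first set, rescan all sets and do list.remove on the running summary) by a frequency table built in one pass over the deduplicated sets, followed by a single ordered filter of the first set's characters.
import Mathlib
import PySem

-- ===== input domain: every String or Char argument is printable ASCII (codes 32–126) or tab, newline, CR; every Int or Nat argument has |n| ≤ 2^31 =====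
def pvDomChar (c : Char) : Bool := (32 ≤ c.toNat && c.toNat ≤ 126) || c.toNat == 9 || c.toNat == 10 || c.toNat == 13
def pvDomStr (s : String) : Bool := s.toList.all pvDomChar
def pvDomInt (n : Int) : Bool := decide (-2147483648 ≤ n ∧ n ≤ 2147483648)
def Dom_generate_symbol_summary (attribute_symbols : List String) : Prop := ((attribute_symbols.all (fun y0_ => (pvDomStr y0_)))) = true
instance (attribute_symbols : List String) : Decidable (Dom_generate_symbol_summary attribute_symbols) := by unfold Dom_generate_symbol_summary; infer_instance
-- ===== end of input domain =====

-- ===== PORT A =====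
-- B replaces A's remove-and-rescan loops by a counting table plus one ordered filter (alternative algorithm, similar measured cost).
-- Python's `symbol not in symbolset` on a 1-character string is ported as char non-membership
-- (exact, since `symbol` is always a single character of the first set).
-- `summary_symbols.remove(symbol)` removes the first occurrence; ValueError is unreachable here
-- (every removal is triggered by a still-present occurrence), so the port's no-op on a missing
-- element is never exercised.
def pyRemoveChar : List Char → Char → List Char
  | [], _ => []
  | x :: r, c => if x = c then r else x :: pyRemoveChar r c

-- the inner `for symbolset in attribute_symbols: ... break`
def gssInner (symbol : Char) (sets : List String) (summ : List Char) : List Char :=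
  match sets with
  | [] => summ
  | s :: rest => if symbol ∉ s.toList then pyRemoveChar summ symbol else gssInner symbol rest summ

def generate_symbol_summary (attribute_symbols : List String) : List String :=
  let xs := attribute_symbols.filter (fun s => s.toList.length > 0)
  if xs.length > 0 then
    let first := (xs.headD "").toList   -- xs[0]; in range since xs.length > 0
    let summary := first.foldl (fun summ symbol => gssInner symbol xs summ) first
    summary.map (fun c => String.mk [c])
  else []

-- ===== PORT B =====
-- counts[c] in Source B never raises KeyError (c comes from sets[0], which was counted), so getD is exact
def generate_symbol_summary_alt (attribute_symbols : List String) : List String :=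
  let sets := attribute_symbols.filter (fun s => s ≠ "")
  if sets.isEmpty then []
  else
    let counts := sets.foldl
      (fun d s => (PySem.Set.ofList s.toList).foldl (fun d c => d.modify c 0 (· + 1)) d)
      (PySem.Dict.empty : PySem.Dict Char Int)
    let n : Int := sets.length
    ((sets.headD "").toList.filter (fun c => counts.getD c 0 == n)).map (fun c => String.mk [c])

-- ===== PRECONDITION & SPEC =====
def Spec_generate_symbol_summary (attribute_symbols : List String) (out : List String) : Prop := out = generate_symbol_summary_alt attribute_symbols
instance (attribute_symbols : List String) (out : List String) : Decidable (Spec_generate_symbol_summary attribute_symbols out) := by unfold Spec_generate_symbol_summary; infer_instance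

-- ===== CLAIM (what is proved, stated in full; the proofs are below) =====
def Claim_equal_generate_symbol_summary : Prop := ∀ (attribute_symbols : List String), Dom_generate_symbol_summary attribute_symbols → Spec_generate_symbol_summary attribute_symbols (generate_symbol_summary attribute_symbols)

-- ===== LEMMAS AND PROOFS =====


-- the char appears in every (non-empty-filtered) set
def gssGood (xs : List String) (c : Char) : Bool := !(xs.any (fun s => decide (c ∉ s.toList)))

theorem gssInner_eq (c : Char) (sets : List String) (summ : List Char) :
    gssInner c sets summ =
      if sets.any (fun s => decide (c ∉ s.toList)) then pyRemoveChar summ c else summ := by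
  induction sets with
  | nil => simp [gssInner]
  | cons s rest ih =>
    simp only [gssInner, List.any_cons]
    by_cases h : c ∈ s.toList <;> simp [h, ih]

theorem pyRemoveChar_append (c : Char) (pre l : List Char) (h : c ∉ pre) :
    pyRemoveChar (pre ++ c :: l) c = pre ++ l := by
  induction pre with
  | nil => simp [pyRemoveChar]
  | cons x r ih =>
    simp only [List.mem_cons, not_or] at h
    simp [pyRemoveChar, h.1, ih h.2, Ne.symm h.1]

theorem gssFold_invariant (xs : List String) (l pre : List Char)
    (hpre : ∀ c ∈ pre, gssGood xs c = true) :
    l.foldl (fun summ symbol => gssInner symbol xs summ) (pre ++ l)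
      = pre ++ l.filter (gssGood xs) := by
  induction l generalizing pre with
  | nil => simp
  | cons c l ih =>
    rw [List.foldl_cons, gssInner_eq, List.filter_cons]
    by_cases hb : (xs.any (fun s => decide (c ∉ s.toList))) = true
    · have hgf : gssGood xs c = false := by simp only [gssGood, hb, Bool.not_true]
      have hc : c ∉ pre := fun hmem => by
        rw [hpre c hmem] at hgf; exact Bool.true_eq_false.mp hgf
      rw [if_pos hb, pyRemoveChar_append c pre l hc, hgf]
      simpa using ih pre hpre
    · have hany : (xs.any (fun s => decide (c ∉ s.toList))) = false := by
        revert hb; cases xs.any (fun s => decide (c ∉ s.toList)) <;> simp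
      have hg : gssGood xs c = true := by simp only [gssGood, hany, Bool.not_false]
      rw [if_neg hb, hg]
      have hrw : pre ++ c :: l = (pre ++ [c]) ++ l := by simp
      rw [hrw, ih (pre ++ [c])]
      · simp
      · intro d hd
        rcases List.mem_append.mp hd with h | h
        · exact hpre d h
        · simp at h; subst h; exact hg

theorem gssCounts_getD (xs : List String) (c : Char) :
    (xs.foldl (fun d s => (PySem.Set.ofList s.toList).foldl (fun d c => d.modify c 0 (· + 1)) d)
        (PySem.Dict.empty : PySem.Dict Char Int)).getD c 0
      = (xs.countP (fun s => decide (c ∈ s.toList)) : Int) := by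
  suffices h : ∀ (xs : List String) (d : PySem.Dict Char Int),
      (xs.foldl (fun d s => (PySem.Set.ofList s.toList).foldl (fun d c => d.modify c 0 (· + 1)) d) d).getD c 0
        = d.getD c 0 + (xs.countP (fun s => decide (c ∈ s.toList)) : Int) by
    simpa [PySem.Dict.getD] using h xs (PySem.Dict.empty : PySem.Dict Char Int)
  intro xs
  induction xs with
  | nil => simp
  | cons s rest ih =>
    intro d
    rw [List.foldl_cons, ih, PySem.Dict.getD_foldl_modify_add_one, List.countP_cons]
    have hcount : List.count c (PySem.Set.ofList s.toList) = if c ∈ s.toList then 1 else 0 := by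
      by_cases h : c ∈ s.toList
      · simp [h, List.count_eq_one_of_mem (PySem.Set.nodup_ofList _) ((PySem.Set.mem_ofList _ _).mpr h)]
      · simp [List.count_eq_zero, h, PySem.Set.mem_ofList]
    rw [hcount]
    by_cases h : c ∈ s.toList <;> simp [h] <;> push_cast <;> ring

theorem gssFilter_eq (xs : List String) :
    xs.filter (fun s => s.toList.length > 0) = xs.filter (fun s => s ≠ "") := by
  apply List.filter_congr
  intro s _
  rcases eq_or_ne s "" with rfl | h
  · simp
  · have h2 : 0 < s.toList.length := by
      cases he : s.toList with
      | nil => exact absurd (by rw [← @String.ofList_toList s, he]) h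
      | cons a l => simp [he]
    have h3 : 0 < s.length := by simpa using h2
    simp [h3, h]

-- ===== VERDICT (by name: the statement is the Claim_ definition above) =====
theorem generate_symbol_summary_spec : Claim_equal_generate_symbol_summary := by
  intro attribute_symbols _
  unfold Spec_generate_symbol_summary generate_symbol_summary generate_symbol_summary_alt
  rw [← gssFilter_eq]
  set xs := attribute_symbols.filter (fun s => decide (s.toList.length > 0)) with hxs
  by_cases h : xs.length > 0
  · have hne : xs ≠ [] := by intro he; rw [he] at h; simp at h
    rw [if_pos h, if_neg (by simp [List.isEmpty_iff, hne])]
    simp only []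
    congr 1
    have hinv := gssFold_invariant xs (xs.headD "").toList [] (by simp)
    simp only [List.nil_append] at hinv
    rw [hinv]
    apply List.filter_congr
    intro c _
    rw [gssCounts_getD]
    simp only [gssGood, Bool.not_eq_eq_eq_not, Bool.not_true]
    by_cases hall : ∀ s ∈ xs, c ∈ s.toList
    · have hcp : xs.countP (fun s => decide (c ∈ s.toList)) = xs.length :=
        List.countP_eq_length.mpr (by simpa using hall)
      have h1 : ((xs.countP (fun s => decide (c ∈ s.toList)) : Int) == (xs.length : Int)) = true := by
        simp [hcp]
      have h2 : (xs.any fun s => decide (c ∉ s.toList)) = false := by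
        simp only [List.any_eq_false, decide_eq_true_eq]
        intro s hs hcs; exact hcs (hall s hs)
      rw [h1, h2]; rfl
    · push_neg at hall
      obtain ⟨s, hs, hcs⟩ := hall
      have hne2 : xs.countP (fun s => decide (c ∈ s.toList)) ≠ xs.length := by
        intro he
        exact hcs (by simpa using List.countP_eq_length.mp he s hs)
      have h1 : ((xs.countP (fun s => decide (c ∈ s.toList)) : Int) == (xs.length : Int)) = false := by
        simp only [beq_eq_false_iff_ne, ne_eq]
        intro he; exact hne2 (by exact_mod_cast he)
      have h2 : (xs.any fun s => decide (c ∉ s.toList)) = true := by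
        simp only [List.any_eq_true, decide_eq_true_eq]
        exact ⟨s, hs, hcs⟩
      rw [h1, h2]; rfl
  · have he : xs = [] := List.eq_nil_of_length_eq_zero (by omega)
    rw [if_neg h, if_pos (by simp [he])]
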